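-- pv_equiv track=rewrite | github.com/Nenogzar/Academy_SoftUni | basics_programming/03_pb_examp/7/06_barcode_generator.py | generate_barcodes
-- ===== SOURCE A (Python) =====
-- def generate_barcodes(start, end):
--     barcodes = []
--     for i in range(start, end + 1):
--         barcode = str(i)
--         if any(int(digit) % 2 == 0 for digit in barcode):
--             continue
--         barcodes.append(barcode)
--     return barcodes
-- ===== SOURCE B (Python) =====
-- def generate_barcodes(start, end):
--     # Enumerate only all-odd-digit candidates, length level by length level
--     # (each level generated in increasing order from the previous one), instead
--     # of scanning every integer of the range.
--     barcodes = []
--     cur = [1, 3, 5, 7, 9]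
--     while cur:
--         for n in cur:
--             if start <= n <= end:
--                 barcodes.append(str(n))
--         cur = [10 * n + d for n in cur if 10 * n + 1 <= end for d in (1, 3, 5, 7, 9)]
--     return barcodes
-- ===== Notes on version B (the rewrite author's own statement) =====
-- stated objective: alternative
-- what changed: Instead of scanning every integer of [start, end] and testing its decimal digits via str(), B generates exactly the all-odd-digit numbers, one digit-length level at a time (each level built in increasing order as 10*n+d from the previous level, pruned once 10*n+1 exceeds end), and keeps those inside [start, end].
import Mathlib
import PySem

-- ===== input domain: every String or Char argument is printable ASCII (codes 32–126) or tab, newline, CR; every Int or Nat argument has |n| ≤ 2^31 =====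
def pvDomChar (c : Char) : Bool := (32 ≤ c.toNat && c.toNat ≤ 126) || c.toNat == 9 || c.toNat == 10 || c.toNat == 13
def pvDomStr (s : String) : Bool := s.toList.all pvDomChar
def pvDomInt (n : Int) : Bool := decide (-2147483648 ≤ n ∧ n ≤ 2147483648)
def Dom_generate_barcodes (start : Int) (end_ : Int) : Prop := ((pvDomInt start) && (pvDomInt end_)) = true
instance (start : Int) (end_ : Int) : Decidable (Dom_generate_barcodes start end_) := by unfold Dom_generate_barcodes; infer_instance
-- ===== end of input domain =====

-- B enumerates only all-odd-digit candidates level by digit-length instead of scanning the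
-- whole range; equivalence is proved on Pre_ (A raises ValueError on negative range members).

-- ===== PORT A =====
-- 'for digit in barcode: int(digit)' — int(digit) is PySem.Int.ofChars? [digit]; it is 'some'
-- for every character Python reaches without raising (Pre_ keeps every i ≥ 0), '.getD 0' totalizes.
def generate_barcodes (start : Int) (end_ : Int) : List String :=
  (PySem.List.pyRange start (end_ + 1) 1).foldl
    (fun barcodes i =>
      let barcode := PySem.Int.toStr i
      if barcode.toList.any
          (fun digit => PySem.Int.mod ((PySem.Int.ofChars? [digit]).getD 0) 2 == 0)
      then barcodes
      else barcodes ++ [barcode])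
    []

-- ===== PORT B =====
-- the while loop of Source B; the fuel only totalizes it: level k of the loop holds numbers ≥ 10^(k-1)
-- and is pruned empty once 10*n+1 > end_, so fewer than end_.toNat + 3 iterations ever run
-- (established inside the equivalence proof below); the fuel-0 branch is never the one that returns.
def bcLoop : Nat → Int → Int → List Int → List String → List String
  | 0, _, _, _, barcodes => barcodes
  | fuel + 1, start, end_, cur, barcodes =>
    match cur with
    | [] => barcodes
    | _ :: _ =>
      bcLoop fuel start end_
        ((cur.filter (fun n => 10 * n + 1 ≤ end_)).flatMap
          (fun n => [10 * n + 1, 10 * n + 3, 10 * n + 5, 10 * n + 7, 10 * n + 9]))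
        (cur.foldl
          (fun r n => if start ≤ n ∧ n ≤ end_ then r ++ [PySem.Int.toStr n] else r)
          barcodes)

def generate_barcodes_alt (start : Int) (end_ : Int) : List String :=
  bcLoop (end_.toNat + 3) start end_ [1, 3, 5, 7, 9] []

-- ===== PRECONDITION & SPEC =====
-- Pre_ excludes exactly the inputs on which A raises: if the range contains a negative i,
-- str(i) starts with '-' and int('-') raises ValueError.
def Pre_generate_barcodes (start : Int) (end_ : Int) : Prop := 0 ≤ start ∨ end_ < start
instance (start : Int) (end_ : Int) : Decidable (Pre_generate_barcodes start end_) := by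
  unfold Pre_generate_barcodes; infer_instance

def pvWitness_generate_barcodes : Int × Int := (1, 20)

def Spec_generate_barcodes (start : Int) (end_ : Int) (out : List String) : Prop :=
  out = generate_barcodes_alt start end_
instance (start : Int) (end_ : Int) (out : List String) : Decidable (Spec_generate_barcodes start end_ out) := by
  unfold Spec_generate_barcodes; infer_instance

-- ===== CLAIM (what is proved, stated in full; the proofs are below) =====
def Claim_equal_generate_barcodes : Prop := ∀ (start : Int) (end_ : Int), Dom_generate_barcodes start end_ → Pre_generate_barcodes start end_ → Spec_generate_barcodes start end_ (generate_barcodes start end_)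

-- ===== LEMMAS AND PROOFS =====

-- `keep x` : x is a positive integer all of whose decimal digits are odd
def keep (x : Int) : Bool := 1 ≤ x && (Nat.digits 10 x.toNat).all (fun d => d % 2 = 1)

-- A's per-character test, as a named Bool predicate on a char
def evenChar (digit : Char) : Bool :=
  PySem.Int.mod ((PySem.Int.ofChars? [digit]).getD 0) 2 == 0

-- ---- decimal-representation bridge: Nat.toDigits 10 (what str(i) prints) vs Nat.digits 10 ----

theorem toDigitsCore_acc (b : Nat) : ∀ (f n : Nat) (l : List Char),
    Nat.toDigitsCore b f n l = Nat.toDigitsCore b f n [] ++ l := by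
  intro f
  induction f with
  | zero => intro n l; simp [Nat.toDigitsCore]
  | succ f ih =>
    intro n l
    simp only [Nat.toDigitsCore]
    by_cases h : n / b = 0
    · simp [h]
    · simp only [h, if_false]
      rw [ih (n / b) ((n % b).digitChar :: l), ih (n / b) [(n % b).digitChar]]
      simp

theorem toDigitsCore_fuel : ∀ (m f1 f2 : Nat), m < f1 → m < f2 → ∀ (l : List Char),
    Nat.toDigitsCore 10 f1 m l = Nat.toDigitsCore 10 f2 m l := by
  intro m
  induction m using Nat.strong_induction_on with
  | _ m ih =>
    intro f1 f2 h1 h2 l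
    match f1, f2 with
    | g1 + 1, g2 + 1 =>
      simp only [Nat.toDigitsCore]
      by_cases h : m / 10 = 0
      · simp [h]
      · simp only [h, if_false]
        exact ih (m / 10) (Nat.div_lt_self (Nat.pos_of_ne_zero (by omega)) (by norm_num)) g1 g2 (by omega) (by omega) _

theorem toDigits_eq_digits : ∀ (n : Nat), n ≠ 0 →
    Nat.toDigits 10 n = ((Nat.digits 10 n).map Nat.digitChar).reverse := by
  intro n
  induction n using Nat.strong_induction_on with
  | _ n ih =>
    intro hn
    rw [Nat.digits_def' (by norm_num) (Nat.pos_of_ne_zero hn)]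
    simp only [Nat.toDigits, Nat.toDigitsCore]
    by_cases h : n / 10 = 0
    · simp [h, Nat.digits_zero]
    · simp only [h, if_false]
      have hlt : n / 10 < n := Nat.div_lt_self (Nat.pos_of_ne_zero hn) (by norm_num)
      rw [toDigitsCore_fuel (n / 10) n (n / 10 + 1) hlt (by omega)]
      rw [toDigitsCore_acc]
      have := ih (n / 10) hlt h
      simp only [Nat.toDigits] at this
      rw [this]
      simp

theorem any_congr_mem {α : Type} (l : List α) (f g : α → Bool) (h : ∀ d ∈ l, f d = g d) :
    l.any f = l.any g := by
  induction l with
  | nil => rfl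
  | cons a t ih => simp only [List.any_cons, h a (by simp), ih (fun d hd => h d (by simp [hd]))]

theorem evenChar_digitChar (d : Nat) (hd : d < 10) :
    evenChar (Nat.digitChar d) = decide (d % 2 = 0) := by
  interval_cases d <;> decide

-- A skips i (some digit of str(i) is even) iff ¬ keep i, for i ≥ 0
theorem anyEven_eq_not_keep (i : Int) (hi : 0 ≤ i) :
    (PySem.Int.toChars i).any evenChar = !keep i := by
  unfold PySem.Int.toChars keep
  rw [if_neg (show ¬ i < 0 by omega)]
  by_cases h0 : i.toNat = 0
  · rw [h0]
    have hni : ¬ (1:Int) ≤ i := by omega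
    simp [Nat.toDigits, Nat.toDigitsCore, hni]
    decide
  · rw [toDigits_eq_digits i.toNat h0]
    have h1 : (1:Int) ≤ i := by omega
    simp only [List.any_reverse, List.any_map, h1, decide_true, Bool.true_and]
    rw [List.all_eq_not_any_not, Bool.not_not]
    apply any_congr_mem
    intro d hd
    have hd10 : d < 10 := Nat.digits_lt_base (by norm_num) hd
    rw [Function.comp_apply, evenChar_digitChar d hd10]
    rcases Nat.mod_two_eq_zero_or_one d with h | h <;> simp [h]

-- ---- B's levels: oddL k = the all-odd-digit numbers with k+1 digits, in increasing order ----

def oddBlocks (n : Int) : List Int := [10 * n + 1, 10 * n + 3, 10 * n + 5, 10 * n + 7, 10 * n + 9]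

def oddL : Nat → List Int
  | 0 => [1, 3, 5, 7, 9]
  | k + 1 => (oddL k).flatMap oddBlocks

theorem keep_div (x : Int) (h : 10 ≤ x) :
    keep x = (decide (x % 10 % 2 = 1) && keep (x / 10)) := by
  unfold keep
  have h1 : x.toNat = 10 * (x.toNat / 10) + x.toNat % 10 := by omega
  rw [Nat.digits_def' (b := 10) (by norm_num) (n := x.toNat) (by omega)]
  have h2 : (x % 10 % 2 = 1) ↔ (x.toNat % 10 % 2 = 1) := by omega
  have h3 : (x / 10).toNat = x.toNat / 10 := by omega
  have h4 : (1:Int) ≤ x := by omega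
  have h5 : (1:Int) ≤ x / 10 := by omega
  simp only [List.all_cons, h3, h2, h4, h5, decide_true, Bool.true_and]

theorem keep_last (x : Int) (h : keep x = true) : x % 10 % 2 = 1 := by
  by_cases h10 : 10 ≤ x
  · rw [keep_div x h10] at h
    exact of_decide_eq_true (Bool.and_elim_left h)
  · unfold keep at h
    simp only [Bool.and_eq_true, decide_eq_true_eq, List.all_eq_true] at h
    obtain ⟨hx1, h2⟩ := h
    have hmem : x.toNat % 10 ∈ Nat.digits 10 x.toNat := by
      rw [Nat.digits_def' (b := 10) (by norm_num) (n := x.toNat) (by omega)]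
      exact List.mem_cons_self
    have := h2 _ hmem
    simp only [decide_eq_true_eq] at this
    omega

theorem keep_step (n d : Int) (hn : 1 ≤ n) (hd0 : 1 ≤ d) (hd : d < 10) :
    keep (10 * n + d) = (decide (d % 2 = 1) && keep n) := by
  have h10 : (10:Int) ≤ 10 * n + d := by omega
  rw [keep_div _ h10]
  have e1 : (10 * n + d) % 10 = d := by omega
  have e2 : (10 * n + d) / 10 = n := by omega
  rw [e1, e2]

theorem mem_oddL (k : Nat) (x : Int) :
    x ∈ oddL k ↔ 10 ^ k ≤ x ∧ x < 10 ^ (k + 1) ∧ keep x = true := by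
  induction k generalizing x with
  | zero =>
    simp only [oddL, pow_zero]
    constructor
    · intro hx
      simp only [List.mem_cons, List.not_mem_nil, or_false] at hx
      rcases hx with h | h | h | h | h <;>
        (subst h; refine ⟨by norm_num, by norm_num, by decide⟩)
    · rintro ⟨h1, h2, hk⟩
      have hlast := keep_last x hk
      rw [pow_one] at h2
      interval_cases x <;> first | decide | (exfalso; revert hlast; decide)
  | succ k ih =>
    have hp : (1:Int) ≤ 10 ^ k := one_le_pow₀ (by norm_num)
    have hpow1 : (10:Int) ^ (k + 1) = 10 * 10 ^ k := by rw [pow_succ]; ring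
    have hpow2 : (10:Int) ^ (k + 2) = 100 * 10 ^ k := by rw [pow_succ, hpow1]; ring
    constructor
    · intro hx
      rw [oddL, List.mem_flatMap] at hx
      obtain ⟨n, hn, hxb⟩ := hx
      obtain ⟨hn1, hn2, hnk⟩ := (ih n).mp hn
      have hn1' : (1:Int) ≤ n := by omega
      simp only [oddBlocks, List.mem_cons, List.not_mem_nil, or_false] at hxb
      rcases hxb with h | h | h | h | h <;>
        (subst h;
         refine ⟨by omega, by omega, ?_⟩ <;>
         rw [keep_step n _ hn1' (by norm_num) (by norm_num)] <;>
         simp [hnk])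
    · rintro ⟨h1, h2, hk⟩
      have h10 : (10:Int) ≤ x := by omega
      have hq1 : 10 ^ k ≤ x / 10 := by omega
      have hq2 : x / 10 < 10 ^ (k + 1) := by omega
      rw [keep_div x h10] at hk
      have hkq : keep (x / 10) = true := Bool.and_elim_right hk
      have hr : x % 10 % 2 = 1 := of_decide_eq_true (Bool.and_elim_left hk)
      rw [oddL, List.mem_flatMap]
      refine ⟨x / 10, (ih _).mpr ⟨hq1, hq2, hkq⟩, ?_⟩
      have hx10 : x = 10 * (x / 10) + x % 10 := by omega
      have : x % 10 = 1 ∨ x % 10 = 3 ∨ x % 10 = 5 ∨ x % 10 = 7 ∨ x % 10 = 9 := by omega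
      simp only [oddBlocks, List.mem_cons, List.not_mem_nil, or_false]
      omega

theorem pairwise_oddL (k : Nat) : (oddL k).Pairwise (· < ·) := by
  induction k with
  | zero => simp only [oddL]; decide
  | succ k ih =>
    rw [oddL, List.pairwise_flatMap]
    refine ⟨fun a _ => ?_, ?_⟩
    · simp only [oddBlocks]
      refine List.Pairwise.cons ?_ (List.Pairwise.cons ?_ (List.Pairwise.cons ?_ (List.Pairwise.cons ?_ (List.pairwise_singleton _ _)))) <;>
        (intro y hy; simp only [List.mem_cons, List.not_mem_nil, or_false] at hy) <;> omega
    · refine ih.imp ?_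
      intro a b hab y hy z hz
      simp only [oddBlocks, List.mem_cons, List.not_mem_nil, or_false] at hy hz
      omega

-- two strictly increasing lists with the same members are equal
theorem sorted_ext (l1 l2 : List Int) (h1 : l1.Pairwise (· < ·)) (h2 : l2.Pairwise (· < ·))
    (hm : ∀ x, x ∈ l1 ↔ x ∈ l2) : l1 = l2 := by
  have n1 : l1.Nodup := h1.imp (fun h => ne_of_lt h)
  have n2 : l2.Nodup := h2.imp (fun h => ne_of_lt h)
  exact List.eq_of_perm_of_sorted (fun a b _ _ hab hba => by omega) h1 h2
    ((List.perm_ext_iff_of_nodup n1 n2).mpr hm)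

-- pruning before building the children = filtering the built level
theorem flatMap_filter_blocks (l : List Int) (c : Int → Bool) (p : Int → Bool)
    (h : ∀ n, ∀ x ∈ oddBlocks n, p x = c n) :
    (l.filter c).flatMap oddBlocks = (l.flatMap oddBlocks).filter p := by
  induction l with
  | nil => rfl
  | cons a t ih =>
    rw [List.flatMap_cons, List.filter_append, ← ih]
    by_cases hc : c a = true
    · rw [List.filter_cons_of_pos hc, List.flatMap_cons,
        (List.filter_eq_self.mpr (fun x hx => by rw [h a x hx, hc]) :
          (oddBlocks a).filter p = oddBlocks a)]
    · rw [List.filter_cons_of_neg hc,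
        (List.filter_eq_nil_iff.mpr (fun x hx => by rw [h a x hx]; simpa using hc) :
          (oddBlocks a).filter p = [])]
      simp

theorem bStep_filter (l : List Int) (end_ : Int) :
    (l.filter (fun n => 10 * n + 1 ≤ end_)).flatMap oddBlocks
      = (l.flatMap oddBlocks).filter (fun x => x - PySem.Int.mod x 10 + 1 ≤ end_) := by
  apply flatMap_filter_blocks
  intro n x hx
  simp only [oddBlocks, List.mem_cons, List.not_mem_nil, or_false] at hx
  have hm : PySem.Int.mod x 10 = x % 10 := PySem.Int.mod_eq_emod_of_pos (by norm_num)
  rcases hx with h | h | h | h | h <;> subst h <;> rw [hm] <;>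
    simp only [decide_eq_decide] <;> omega

theorem foldl_append_ite {α β : Type} (P : α → Prop) [DecidablePred P] (f : α → β) :
    ∀ (l : List α) (init : List β),
    l.foldl (fun r n => if P n then r ++ [f n] else r) init
      = init ++ (l.filter (fun n => decide (P n))).map f := by
  intro l
  induction l with
  | nil => simp
  | cons a t ih =>
    intro init
    rw [List.foldl_cons]
    by_cases h : P a
    · rw [if_pos h, ih, List.filter_cons_of_pos (by simpa using h)]
      simp
    · rw [if_neg h, ih, List.filter_cons_of_neg (by simpa using h)]

theorem foldl_skip_ite {α β : Type} (p : α → Bool) (f : α → β) :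
    ∀ (l : List α) (init : List β),
    l.foldl (fun r n => if p n = true then r else r ++ [f n]) init
      = init ++ (l.filter (fun n => !p n)).map f := by
  intro l
  induction l with
  | nil => simp
  | cons a t ih =>
    intro init
    rw [List.foldl_cons]
    by_cases h : p a = true
    · rw [if_pos h, ih, List.filter_cons_of_neg (by simp [h])]
    · rw [if_neg h, ih, List.filter_cons_of_pos (by simp [h])]
      simp

-- every all-odd-digit number ≥ 10^j has an all-odd-digit ancestor at level j
theorem exists_mem_oddL_le (j : Nat) : ∀ (m : Nat) (x : Int), x.toNat ≤ m → keep x = true →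
    10 ^ j ≤ x → ∃ y ∈ oddL j, y ≤ x := by
  intro m
  induction m with
  | zero =>
    intro x hm hk hj
    have h1 : (1:Int) ≤ x := of_decide_eq_true (Bool.and_elim_left hk)
    omega
  | succ m ih =>
    intro x hm hk hj
    have hp : (1:Int) ≤ 10 ^ j := one_le_pow₀ (by norm_num)
    by_cases hlt : x < 10 ^ (j + 1)
    · exact ⟨x, (mem_oddL j x).mpr ⟨hj, hlt, hk⟩, le_refl x⟩
    · have hpow1 : (10:Int) ^ (j + 1) = 10 * 10 ^ j := by rw [pow_succ]; ring
      have h10 : (10:Int) ≤ x := by omega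
      rw [keep_div x h10] at hk
      obtain ⟨y, hy, hyx⟩ := ih (x / 10) (by omega) (Bool.and_elim_right hk) (by omega)
      exact ⟨y, hy, by omega⟩

-- keep x implies a positive last digit, hence prunability transfers
theorem keep_prune (x end_ : Int) (hk : keep x = true) (hle : x ≤ end_) :
    (decide (x - PySem.Int.mod x 10 + 1 ≤ end_)) = true := by
  rw [PySem.Int.mod_eq_emod_of_pos (by norm_num)]
  have h1 := keep_last x hk
  have h2 : 0 ≤ x % 10 := Int.emod_nonneg x (by norm_num)
  simp only [decide_eq_true_eq]
  omega

-- the level-k slice of the canonical answer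
theorem piece (start end_ : Int) (k : Nat) :
    ((oddL k).filter (fun x => decide (start ≤ x ∧ x ≤ end_))).map PySem.Int.toStr
      ++ ((PySem.List.pyRange (10 ^ (k + 1)) (end_ + 1) 1).filter
            (fun x => start ≤ x && keep x)).map PySem.Int.toStr
    = ((PySem.List.pyRange (10 ^ k) (end_ + 1) 1).filter
        (fun x => start ≤ x && keep x)).map PySem.Int.toStr := by
  have hp : (1:Int) ≤ 10 ^ k := one_le_pow₀ (by norm_num)
  have hpow1 : (10:Int) ^ (k + 1) = 10 * 10 ^ k := by rw [pow_succ]; ring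
  have hmem : ∀ (B : Int), B ≤ 10 ^ (k + 1) → (∀ x, 10 ^ k ≤ x → x < 10 ^ (k+1) → keep x = true → start ≤ x →
        (x ≤ end_ ↔ x < B)) →
      (oddL k).filter (fun x => decide (start ≤ x ∧ x ≤ end_))
        = (PySem.List.pyRange (10 ^ k) B 1).filter (fun x => start ≤ x && keep x) := by
    intro B hB2 hB
    apply sorted_ext
    · exact (pairwise_oddL k).filter _
    · exact (PySem.List.pairwise_lt_pyRange_one _ _).filter _
    · intro x
      simp only [List.mem_filter, mem_oddL, PySem.List.mem_pyRange_one,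
        decide_eq_true_eq, Bool.and_eq_true]
      constructor
      · rintro ⟨⟨hb1, hb2, hk⟩, hs, he⟩
        exact ⟨⟨hb1, (hB x hb1 hb2 hk hs).mp he⟩, by simpa using hs, hk⟩
      · rintro ⟨⟨hb1, hb2⟩, hs, hk⟩
        have hs' : start ≤ x := by simpa using hs
        have hlt : x < 10 ^ (k + 1) := by omega
        exact ⟨⟨hb1, hlt, hk⟩, hs', (hB x hb1 hlt hk hs').mpr hb2⟩
  by_cases hc : end_ + 1 ≤ 10 ^ (k + 1)
  · rw [PySem.List.pyRange_one_eq_nil hc]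
    simp only [List.filter_nil, List.map_nil, List.append_nil]
    rw [hmem (end_ + 1) hc (fun x _ _ _ _ => by omega)]
  · rw [PySem.List.pyRange_one_append (10 ^ k) (10 ^ (k + 1)) (end_ + 1) (by omega) (by omega),
      List.filter_append, List.map_append]
    rw [hmem (10 ^ (k + 1)) (le_refl _) (fun x h1 h2 _ _ => by omega)]

theorem bcLoop_eq (start end_ : Int) : ∀ (f k : Nat) (res : List String), 1 ≤ k →
    end_ + 9 < 10 ^ (k + f) →
    bcLoop f start end_
        ((oddL k).filter (fun x => x - PySem.Int.mod x 10 + 1 ≤ end_)) res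
      = res ++ ((PySem.List.pyRange (10 ^ k) (end_ + 1) 1).filter
          (fun x => start ≤ x && keep x)).map PySem.Int.toStr := by
  intro f
  induction f with
  | zero =>
    intro k res hk hfuel
    have hp : (1:Int) ≤ 10 ^ k := one_le_pow₀ (by norm_num)
    rw [Nat.add_zero] at hfuel
    rw [PySem.List.pyRange_one_eq_nil (by omega)]
    simp [bcLoop]
  | succ f ih =>
    intro k res hk hfuel
    have hp : (1:Int) ≤ 10 ^ k := one_le_pow₀ (by norm_num)
    rcases hcur : (oddL k).filter (fun x => x - PySem.Int.mod x 10 + 1 ≤ end_) with _ | ⟨c, cs⟩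
    · -- pruned level empty: nothing of the canonical tail survives either
      simp only [bcLoop]
      have : (PySem.List.pyRange (10 ^ k) (end_ + 1) 1).filter
          (fun x => start ≤ x && keep x) = [] := by
        rw [List.filter_eq_nil_iff]
        rintro x hxr hxq
        rw [PySem.List.mem_pyRange_one] at hxr
        simp only [Bool.and_eq_true, decide_eq_true_eq] at hxq
        obtain ⟨y, hy, hyx⟩ := exists_mem_oddL_le k x.toNat x (le_refl _) hxq.2 hxr.1
        have : y ∈ (oddL k).filter (fun x => x - PySem.Int.mod x 10 + 1 ≤ end_) := by
          rw [List.mem_filter]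
          exact ⟨hy, keep_prune y end_ ((mem_oddL k y).mp hy).2.2 (by omega)⟩
        rw [hcur] at this
        simp at this
      rw [this]
      simp
    · -- live level: process it, recurse on the next one
      simp only [bcLoop]
      rw [← hcur]
      have hblocks : (fun n => [10 * n + 1, 10 * n + 3, 10 * n + 5, 10 * n + 7, 10 * n + 9])
          = oddBlocks := rfl
      rw [hblocks]
      -- the processed strings of this level
      rw [foldl_append_ite (fun n => start ≤ n ∧ n ≤ end_) PySem.Int.toStr]
      -- double filters collapse
      rw [List.filter_filter, List.filter_filter]
      rw [List.filter_congr (l := oddL k)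
        (p := fun n => decide (10 * n + 1 ≤ end_) && decide (n - PySem.Int.mod n 10 + 1 ≤ end_))
        (q := fun n => decide (10 * n + 1 ≤ end_))
        (fun x hx => by
          have hx1 : (1:Int) ≤ x := by
            have h1 := ((mem_oddL k x).mp hx).1
            have hp : (1:Int) ≤ 10 ^ k := one_le_pow₀ (by norm_num)
            omega
          by_cases hq : 10 * x + 1 ≤ end_
          · have h2 : decide (x - PySem.Int.mod x 10 + 1 ≤ end_) = true := by
              rw [PySem.Int.mod_eq_emod_of_pos (by norm_num)]
              have h3 : 0 ≤ x % 10 := Int.emod_nonneg x (by norm_num)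
              simp only [decide_eq_true_eq]
              omega
            show (decide (10 * x + 1 ≤ end_) && decide (x - PySem.Int.mod x 10 + 1 ≤ end_))
              = decide (10 * x + 1 ≤ end_)
            rw [decide_eq_true hq, h2]
            rfl
          · show (decide (10 * x + 1 ≤ end_) && decide (x - PySem.Int.mod x 10 + 1 ≤ end_))
              = decide (10 * x + 1 ≤ end_)
            rw [decide_eq_false hq, Bool.false_and])]
      rw [List.filter_congr (l := oddL k)
        (p := fun n => decide (start ≤ n ∧ n ≤ end_) && decide (n - PySem.Int.mod n 10 + 1 ≤ end_))
        (q := fun x => decide (start ≤ x ∧ x ≤ end_))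
        (fun x hx => by
          have hkx := ((mem_oddL k x).mp hx).2.2
          by_cases hq : start ≤ x ∧ x ≤ end_
          · show (decide (start ≤ x ∧ x ≤ end_) && decide (x - PySem.Int.mod x 10 + 1 ≤ end_))
              = decide (start ≤ x ∧ x ≤ end_)
            rw [decide_eq_true hq, keep_prune x end_ hkx hq.2]
            rfl
          · show (decide (start ≤ x ∧ x ≤ end_) && decide (x - PySem.Int.mod x 10 + 1 ≤ end_))
              = decide (start ≤ x ∧ x ≤ end_)
            rw [decide_eq_false hq, Bool.false_and])]
      rw [bStep_filter]
      have hnext : (oddL k).flatMap oddBlocks = oddL (k + 1) := rfl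
      rw [hnext]
      rw [ih (k + 1) _ (by omega) (by rwa [show k + 1 + f = k + (f + 1) from by omega])]
      rw [List.append_assoc]
      congr 1
      exact piece start end_ k

theorem bcLoop_cons (f : Nat) (start end_ : Int) (c : Int) (cs : List Int) (res : List String) :
    bcLoop (f + 1) start end_ (c :: cs) res
      = bcLoop f start end_
          (((c :: cs).filter (fun n => 10 * n + 1 ≤ end_)).flatMap
            (fun n => [10 * n + 1, 10 * n + 3, 10 * n + 5, 10 * n + 7, 10 * n + 9]))
          ((c :: cs).foldl
            (fun r n => if start ≤ n ∧ n ≤ end_ then r ++ [PySem.Int.toStr n] else r) res) := rfl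

theorem end9_lt (end_ : Int) : end_ + 9 < 10 ^ (1 + (end_.toNat + 2)) := by
  have h1 : end_.toNat < 10 ^ end_.toNat := Nat.lt_pow_self (by norm_num)
  have h2 : (10:Int) ^ (1 + (end_.toNat + 2)) = 1000 * 10 ^ end_.toNat := by
    rw [show 1 + (end_.toNat + 2) = end_.toNat + 3 from by omega, pow_add]
    ring
  have h3 : ((10:Int) ^ end_.toNat) = ((10 ^ end_.toNat : Nat) : Int) := by push_cast; rfl
  omega

theorem alt_eq_canon (start end_ : Int) :
    generate_barcodes_alt start end_
      = ((PySem.List.pyRange 1 (end_ + 1) 1).filter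
          (fun x => start ≤ x && keep x)).map PySem.Int.toStr := by
  unfold generate_barcodes_alt
  rw [show end_.toNat + 3 = (end_.toNat + 2) + 1 from rfl]
  rw [bcLoop_cons]
  rw [foldl_append_ite (fun n => start ≤ n ∧ n ≤ end_) PySem.Int.toStr]
  have hblocks : (fun n : Int => [10 * n + 1, 10 * n + 3, 10 * n + 5, 10 * n + 7, 10 * n + 9])
      = oddBlocks := rfl
  rw [hblocks]
  have h0 : ([1, 3, 5, 7, 9] : List Int) = oddL 0 := rfl
  rw [h0, bStep_filter (oddL 0) end_]
  have hnext : (oddL 0).flatMap oddBlocks = oddL 1 := rfl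
  rw [hnext, bcLoop_eq start end_ (end_.toNat + 2) 1 _ (by norm_num) (end9_lt end_)]
  rw [List.nil_append]
  have := piece start end_ 0
  rw [pow_zero] at this
  rw [← this]

theorem a_eq_canon (start end_ : Int) (h : 0 ≤ start ∨ end_ < start) :
    generate_barcodes start end_
      = ((PySem.List.pyRange start (end_ + 1) 1).filter keep).map PySem.Int.toStr := by
  unfold generate_barcodes
  rcases h with h0 | hlt
  · show (PySem.List.pyRange start (end_ + 1) 1).foldl
        (fun barcodes i =>
          if (PySem.Int.toStr i).toList.any evenChar = true then barcodes
          else barcodes ++ [PySem.Int.toStr i]) []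
      = ((PySem.List.pyRange start (end_ + 1) 1).filter keep).map PySem.Int.toStr
    rw [foldl_skip_ite (fun i => (PySem.Int.toStr i).toList.any evenChar) PySem.Int.toStr]
    rw [List.nil_append]
    congr 1
    apply List.filter_congr
    intro x hx
    rw [PySem.List.mem_pyRange_one] at hx
    rw [PySem.Int.toList_toStr, anyEven_eq_not_keep x (by omega), Bool.not_not]
  · rw [PySem.List.pyRange_one_eq_nil (by omega)]
    rfl

theorem canon_shift (start end_ : Int) :
    (PySem.List.pyRange start (end_ + 1) 1).filter keep
      = (PySem.List.pyRange 1 (end_ + 1) 1).filter (fun x => start ≤ x && keep x) := by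
  apply sorted_ext
  · exact (PySem.List.pairwise_lt_pyRange_one _ _).filter _
  · exact (PySem.List.pairwise_lt_pyRange_one _ _).filter _
  · intro x
    simp only [List.mem_filter, PySem.List.mem_pyRange_one, Bool.and_eq_true, decide_eq_true_eq]
    constructor
    · rintro ⟨⟨h1, h2⟩, hk⟩
      have hx1 : (1:Int) ≤ x := of_decide_eq_true (Bool.and_elim_left hk)
      exact ⟨⟨hx1, h2⟩, h1, hk⟩
    · rintro ⟨⟨h1, h2⟩, hs, hk⟩
      exact ⟨⟨hs, h2⟩, hk⟩

-- ===== VERDICT (by name: the statement is the Claim_ definition above) =====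
theorem generate_barcodes_spec : Claim_equal_generate_barcodes := by
  intro start end_ _ hpre
  unfold Spec_generate_barcodes
  rw [a_eq_canon start end_ hpre, alt_eq_canon, canon_shift]
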